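-- pv_equiv track=rewrite | github.com/Sreesh-N/Zaggle-Ai-Agent | utils/response_generator.py | _format_review_response
-- ===== SOURCE A (Python) =====
-- def _format_review_response(response):
--     """Format the response specifically for review replies"""
--     # Split into paragraphs while preserving blank lines
--     paragraphs = []
--     current_para = []
--
--     for line in response.split('\n'):
--         stripped_line = line.strip()
--         if not stripped_line:
--             if current_para:
--                 paragraphs.append(' '.join(current_para))
--                 current_para = []
--         else:
--             # Skip any unwanted lines
--             if not any(stripped_line.lower().startswith(word)
--                     for word in ['dear', 'hi ', 'hello', 'best', 'regards', 'sincerely']):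
--                 current_para.append(stripped_line)
--
--     if current_para:
--         paragraphs.append(' '.join(current_para))
--
--     # Ensure exactly 3 paragraphs with proper spacing
--     if len(paragraphs) > 3:
--         paragraphs = paragraphs[:3]
--     elif len(paragraphs) < 3:
--         paragraphs.extend([""] * (3 - len(paragraphs)))
--
--     return '\n\n'.join(paragraphs)
-- ===== SOURCE B (Python) =====
-- def _format_review_response(response):
--     """Format the response specifically for review replies"""
--     greetings = ('dear', 'hi ', 'hello', 'best', 'regards', 'sincerely')
--
--     # Pass 1: group the lines into blocks of consecutive non-blank lines.
--     def blocks(lines):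
--         out = []
--         i, n = 0, len(lines)
--         while i < n:
--             if not lines[i].strip():
--                 i += 1
--                 continue
--             j = i + 1
--             while j < n and lines[j].strip():
--                 j += 1
--             out.append(lines[i:j])
--             i = j
--         return out
--
--     # Pass 2: per block, drop greeting lines and join; discard empty blocks.
--     paras = []
--     for blk in blocks(response.split('\n')):
--         kept = [l.strip() for l in blk
--                 if not l.strip().lower().startswith(greetings)]
--         if kept:
--             paras.append(' '.join(kept))
--
--     # Exactly three paragraphs: truncate or right-pad with ''.
--     return '\n\n'.join((paras + ['', '', ''])[:3])
-- ===== Notes on version B (the rewrite author's own statement) =====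
-- stated objective: simpler
-- what changed: Replaces A's single stateful accumulator pass (current_para flushed on blank lines, plus a separate post-loop flush and a branchy truncate/pad) with a group-first-then-filter structure: split the lines into blocks of consecutive non-blank lines, then per block filter greetings and join, and finish with a uniform pad-and-take-3.
import Mathlib
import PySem

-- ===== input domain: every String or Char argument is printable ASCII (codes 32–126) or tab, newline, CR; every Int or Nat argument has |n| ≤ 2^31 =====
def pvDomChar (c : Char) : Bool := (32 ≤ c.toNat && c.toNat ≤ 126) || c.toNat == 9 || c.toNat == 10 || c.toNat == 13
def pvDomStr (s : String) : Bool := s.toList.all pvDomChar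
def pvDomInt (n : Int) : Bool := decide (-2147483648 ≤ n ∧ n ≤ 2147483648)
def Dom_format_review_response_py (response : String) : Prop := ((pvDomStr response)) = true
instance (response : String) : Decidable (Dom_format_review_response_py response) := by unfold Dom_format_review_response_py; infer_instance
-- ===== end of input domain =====

-- B replaces A's stateful accumulator pass with a group-lines-into-blocks-then-filter decomposition (same cost, plainer structure).


-- greeting prefixes (the literal tuple both Pythons carry)
def pvGreetings : List String := ["dear", "hi ", "hello", "best", "regards", "sincerely"]

-- 'stripped.lower().startswith(<greetings>)' / 'any(stripped.lower().startswith(word) for word in …)'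
def pvIsGreeting (stripped : String) : Bool :=
  pvGreetings.any (fun w => PySem.Str.startswith (PySem.Str.lower stripped) w)

-- ===== PORT A =====
-- A's loop body: state = (paragraphs, current_para)
def pvStepA (st : List String × List String) (line : String) : List String × List String :=
  let stripped := PySem.Str.strip line
  if stripped = "" then
    if st.2 ≠ [] then (st.1 ++ [PySem.Str.join " " st.2], []) else st
  else
    if pvIsGreeting stripped then st
    else (st.1, st.2 ++ [stripped])

def format_review_response_py (response : String) : String :=
  -- response.split('\n'): the separator is the nonempty literal '\n', so split? is never none
  let lines := (PySem.Str.split? response "\n").getD []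
  let st := lines.foldl pvStepA ([], [])
  let paragraphs := if st.2 ≠ [] then st.1 ++ [PySem.Str.join " " st.2] else st.1
  let paragraphs :=
    if paragraphs.length > 3 then PySem.List.slice paragraphs none (some 3)
    else if paragraphs.length < 3 then paragraphs ++ List.replicate (3 - paragraphs.length) ""
    else paragraphs
  PySem.Str.join "\n\n" paragraphs

-- ===== PORT B =====
def pvBlank (l : String) : Bool := PySem.Str.strip l == ""

-- Source B's blocks(): maximal runs of consecutive non-blank lines
def pvBlocks : List String → List (List String)
  | [] => []
  | l :: ls =>
    if pvBlank l then pvBlocks ls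
    else (l :: ls.takeWhile (fun x => !pvBlank x)) :: pvBlocks (ls.dropWhile (fun x => !pvBlank x))
termination_by ls => ls.length
decreasing_by
  · simp
  · exact Nat.lt_succ_of_le (List.length_dropWhile_le _ _)

-- '[l.strip() for l in blk if not l.strip().lower().startswith(greetings)]'
def pvKeep (blk : List String) : List String :=
  (blk.filter (fun l => !pvIsGreeting (PySem.Str.strip l))).map PySem.Str.strip

-- per block: drop greeting lines, strip, discard if nothing is left
def pvPara (blk : List String) : Option String :=
  if (pvKeep blk).isEmpty then none else some (PySem.Str.join " " (pvKeep blk))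

def format_review_response_py_alt (response : String) : String :=
  let paras := (pvBlocks ((PySem.Str.split? response "\n").getD [])).filterMap pvPara
  PySem.Str.join "\n\n" ((paras ++ ["", "", ""]).take 3)

-- ===== PRECONDITION & SPEC =====
def Spec_format_review_response_py (response : String) (out : String) : Prop := out = format_review_response_py_alt response
instance (response : String) (out : String) : Decidable (Spec_format_review_response_py response out) := by unfold Spec_format_review_response_py; infer_instance

-- ===== CLAIM (what is proved, stated in full; the proofs are below) =====
def Claim_equal_format_review_response_py : Prop := ∀ (response : String), Dom_format_review_response_py response → Spec_format_review_response_py response (format_review_response_py response)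

-- ===== LEMMAS AND PROOFS =====

-- A's remaining computation, written as a recursion over the lines (cur = current_para)
def pvEmit : List String → List String → List String
  | cur, [] => if cur = [] then [] else [PySem.Str.join " " cur]
  | cur, l :: ls =>
    let s := PySem.Str.strip l
    if s = "" then (if cur = [] then [] else [PySem.Str.join " " cur]) ++ pvEmit [] ls
    else if pvIsGreeting s then pvEmit cur ls
    else pvEmit (cur ++ [s]) ls

lemma pvFoldA_eq_emit (lines : List String) : ∀ (acc cur : List String),
    (if (lines.foldl pvStepA (acc, cur)).2 ≠ [] then
        (lines.foldl pvStepA (acc, cur)).1 ++ [PySem.Str.join " " (lines.foldl pvStepA (acc, cur)).2]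
     else (lines.foldl pvStepA (acc, cur)).1) = acc ++ pvEmit cur lines := by
  induction lines with
  | nil =>
    intro acc cur
    by_cases h : cur = [] <;> simp [pvEmit, h]
  | cons l ls ih =>
    intro acc cur
    simp only [List.foldl_cons, pvStepA, pvEmit]
    by_cases hb : PySem.Str.strip l = ""
    · by_cases hc : cur = [] <;> simp [hb, hc, ih]
    · by_cases hg : pvIsGreeting (PySem.Str.strip l) <;> simp [hb, hg, ih]

lemma pvEmit_block (blk : List String) (hnb : ∀ x ∈ blk, pvBlank x = false) :
    ∀ (cur rest : List String), pvEmit cur (blk ++ rest) = pvEmit (cur ++ pvKeep blk) rest := by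
  induction blk with
  | nil => intro cur rest; simp [pvKeep]
  | cons x xs ih =>
    intro cur rest
    have hx : ¬ PySem.Str.strip x = "" := by
      have := hnb x List.mem_cons_self
      simpa [pvBlank] using this
    have hxs : ∀ y ∈ xs, pvBlank y = false := fun y hy => hnb y (List.mem_cons_of_mem _ hy)
    by_cases hg : pvIsGreeting (PySem.Str.strip x)
    · simp [pvEmit, hx, hg, ih hxs, pvKeep]
    · simp [pvEmit, hx, hg, ih hxs, pvKeep]

lemma pvEmit_nil_eq (lines : List String) :
    pvEmit [] lines = (pvBlocks lines).filterMap pvPara := by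
  induction lines using pvBlocks.induct with
  | case1 => simp [pvEmit, pvBlocks]
  | case2 l ls hb ih =>
    have hb' : PySem.Str.strip l = "" := by simpa [pvBlank] using hb
    rw [pvBlocks]
    simp [pvEmit, hb', hb, ih]
  | case3 l ls hb ih =>
    have hb' : ¬ PySem.Str.strip l = "" := by simpa [pvBlank] using hb
    have hnb : ∀ x ∈ l :: ls.takeWhile (fun x => !pvBlank x), pvBlank x = false := by
      intro x hx
      rcases List.mem_cons.mp hx with h | h
      · subst h; simpa using hb
      · simpa using List.mem_takeWhile_imp h
    have hmain : pvEmit [] (l :: ls) =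
        pvEmit (pvKeep (l :: ls.takeWhile (fun x => !pvBlank x))) (ls.dropWhile (fun x => !pvBlank x)) := by
      conv_lhs => rw [show l :: ls =
        (l :: ls.takeWhile (fun x => !pvBlank x)) ++ ls.dropWhile (fun x => !pvBlank x) by simp]
      rw [pvEmit_block _ hnb]
      simp
    have hblocks : pvBlocks (l :: ls) =
        (l :: ls.takeWhile (fun x => !pvBlank x)) :: pvBlocks (ls.dropWhile (fun x => !pvBlank x)) := by
      rw [pvBlocks]; simp [hb]
    rw [hmain, hblocks]
    rcases hr : ls.dropWhile (fun x => !pvBlank x) with _ | ⟨r, rs⟩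
    · by_cases hk : pvKeep (l :: ls.takeWhile (fun x => !pvBlank x)) = [] <;>
        simp [pvEmit, pvPara, hk, pvBlocks, List.isEmpty_iff]
    · have hne : ls.dropWhile (fun x => !pvBlank x) ≠ [] := by simp [hr]
      have hrb : pvBlank r = true := by
        have := List.head_dropWhile_not (l := ls) (p := fun x => !pvBlank x) hne
        simpa [hr] using this
      have hrs : PySem.Str.strip r = "" := by simpa [pvBlank] using hrb
      rw [hr] at ih
      have hbl : pvBlocks (r :: rs) = pvBlocks rs := by rw [pvBlocks]; simp [hrb]
      rw [hbl] at ih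
      have hstep : pvEmit [] rs = (pvBlocks rs).filterMap pvPara := by
        simpa [pvEmit, hrs] using ih
      by_cases hk : pvKeep (l :: ls.takeWhile (fun x => !pvBlank x)) = [] <;>
        simp [pvEmit, pvPara, hk, hrs, List.isEmpty_iff, hstep, hbl]

lemma pvPad_eq (p : List String) :
    (if p.length > 3 then PySem.List.slice p none (some 3)
     else if p.length < 3 then p ++ List.replicate (3 - p.length) ""
     else p) = (p ++ ["", "", ""]).take 3 := by
  match p with
  | [] => decide
  | [a] => simp
  | [a, b] => simp
  | a :: b :: c :: t =>
    match t with
    | [] => simp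
    | d :: t' => simp [PySem.List.slice]

-- ===== VERDICT (by name: the statement is the Claim_ definition above) =====
theorem format_review_response_py_spec : Claim_equal_format_review_response_py := by
  intro response _
  unfold Spec_format_review_response_py format_review_response_py format_review_response_py_alt
  simp only []
  rw [pvFoldA_eq_emit, List.nil_append, pvEmit_nil_eq, pvPad_eq]
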